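-- pv_equiv track=rewrite | github.com/Harikishanth/CloudSRE | server/graders.py | _has_diagnostic_before_fix
-- ===== SOURCE A (Python) =====
-- from typing import Dict, List, Tuple, Optional
--
-- def _has_diagnostic_before_fix(history: List[dict]) -> bool:
--     """Check if agent investigated before attempting a fix."""
--     fix_idx = None
--     diag_idx = None
--     for i, h in enumerate(history):
--         cmd_type = h.get("cmd_type", h.get("phase", ""))
--         if cmd_type in ("health_check", "logs", "metrics", "database"):
--             if diag_idx is None:
--                 diag_idx = i
--         elif cmd_type == "fix":
--             if fix_idx is None:
--                 fix_idx = i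
--
--     # Good: diagnostic happened before fix
--     if diag_idx is not None and fix_idx is not None:
--         return diag_idx < fix_idx
--     return diag_idx is not None  # At least some diagnostics
-- ===== SOURCE B (Python) =====
-- from typing import Dict, List, Tuple, Optional
--
-- def _has_diagnostic_before_fix(history: List[dict]) -> bool:
--     """Check if agent investigated before attempting a fix."""
--     for h in history:
--         cmd_type = h.get("cmd_type", h.get("phase", ""))
--         if cmd_type in ("health_check", "logs", "metrics", "database"):
--             return True
--         if cmd_type == "fix":
--             return False
--     return False
-- ===== Notes on version B (the rewrite author's own statement) =====
-- stated objective: simpler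
-- what changed: Replaced the two-index full scan plus final comparison with a single early-exit loop that returns on the first diagnostic or fix command, since the result depends only on which relevant command comes first.
import Mathlib
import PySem

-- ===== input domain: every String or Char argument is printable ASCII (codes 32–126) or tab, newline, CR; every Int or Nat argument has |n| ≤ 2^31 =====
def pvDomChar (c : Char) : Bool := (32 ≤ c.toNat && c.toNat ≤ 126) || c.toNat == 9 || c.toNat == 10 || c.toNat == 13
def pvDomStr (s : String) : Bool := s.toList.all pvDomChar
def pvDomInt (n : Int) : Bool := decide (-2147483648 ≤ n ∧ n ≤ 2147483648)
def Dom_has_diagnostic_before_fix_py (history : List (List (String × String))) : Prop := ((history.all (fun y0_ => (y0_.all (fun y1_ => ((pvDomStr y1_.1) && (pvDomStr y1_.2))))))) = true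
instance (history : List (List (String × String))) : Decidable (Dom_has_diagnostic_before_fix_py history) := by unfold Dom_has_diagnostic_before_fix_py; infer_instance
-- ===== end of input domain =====

-- B replaces A's two-index full scan plus final comparison with a single early-exit loop
-- (simpler: the answer is determined by the first diagnostic-or-fix command).

-- ===== PORT A =====
-- shared helper: Python dict lookup h.get(k, dflt) on an association list (first match)
def pvGetD (d : List (String × String)) (k dflt : String) : String :=
  match d with
  | [] => dflt
  | (k', v) :: rest => if k' == k then v else pvGetD rest k dflt

-- cmd_type = h.get("cmd_type", h.get("phase", ""))
def pvCmdType (h : List (String × String)) : String :=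
  pvGetD h "cmd_type" (pvGetD h "phase" "")

-- cmd_type in ("health_check", "logs", "metrics", "database")
def pvIsDiag (c : String) : Bool :=
  c == "health_check" || c == "logs" || c == "metrics" || c == "database"

-- A's for-loop over enumerate(history) carrying diag_idx and fix_idx
def pvLoopA (history : List (List (String × String))) (i : Nat)
    (diag fix : Option Nat) : Option Nat × Option Nat :=
  match history with
  | [] => (diag, fix)
  | h :: rest =>
    let c := pvCmdType h
    if pvIsDiag c then
      pvLoopA rest (i + 1) (if diag.isNone then some i else diag) fix
    else if c == "fix" then
      pvLoopA rest (i + 1) diag (if fix.isNone then some i else fix)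
    else
      pvLoopA rest (i + 1) diag fix

-- A's final return: diag < fix when both set, else 'diag is not None'
def pvFinalA (r : Option Nat × Option Nat) : Bool :=
  match r with
  | (some d, some f) => decide (d < f)
  | (some _, none) => true
  | (none, _) => false

def has_diagnostic_before_fix_py (history : List (List (String × String))) : Bool :=
  pvFinalA (pvLoopA history 0 none none)

-- ===== PORT B =====
def has_diagnostic_before_fix_py_alt (history : List (List (String × String))) : Bool :=
  match history with
  | [] => false
  | h :: rest =>
    let c := pvCmdType h
    if pvIsDiag c then true
    else if c == "fix" then false
    else has_diagnostic_before_fix_py_alt rest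

-- ===== PRECONDITION & SPEC =====
def Spec_has_diagnostic_before_fix_py (history : List (List (String × String))) (out : Bool) : Prop := out = has_diagnostic_before_fix_py_alt history
instance (history : List (List (String × String))) (out : Bool) : Decidable (Spec_has_diagnostic_before_fix_py history out) := by unfold Spec_has_diagnostic_before_fix_py; infer_instance

-- ===== CLAIM (what is proved, stated in full; the proofs are below) =====
def Claim_equal_has_diagnostic_before_fix_py : Prop := ∀ (history : List (List (String × String))), Dom_has_diagnostic_before_fix_py history → Spec_has_diagnostic_before_fix_py history (has_diagnostic_before_fix_py history)

-- ===== LEMMAS AND PROOFS =====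
-- once both indices are set, A's loop never changes its state
theorem pvLoopA_both (hs : List (List (String × String))) (i d f : Nat) :
    pvLoopA hs i (some d) (some f) = (some d, some f) := by
  induction hs generalizing i with
  | nil => rfl
  | cons h rest ih => simp [pvLoopA, ih]

-- with diag already set before position i, A's verdict is true
theorem pvLoopA_diag (hs : List (List (String × String))) (i d : Nat) (hd : d < i) :
    pvFinalA (pvLoopA hs i (some d) none) = true := by
  induction hs generalizing i with
  | nil => rfl
  | cons h rest ih =>
    simp only [pvLoopA, Option.isNone_some, Option.isNone_none, Bool.false_eq_true,
      if_false, if_true]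
    split_ifs with h1 h2
    · exact ih (i + 1) (Nat.lt_succ_of_lt hd)
    · simp [pvLoopA_both, pvFinalA, hd]
    · exact ih (i + 1) (Nat.lt_succ_of_lt hd)

-- with fix already set before position i (and no diag yet), A's verdict is false
theorem pvLoopA_fix (hs : List (List (String × String))) (i f : Nat) (hf : f < i) :
    pvFinalA (pvLoopA hs i none (some f)) = false := by
  induction hs generalizing i with
  | nil => rfl
  | cons h rest ih =>
    simp only [pvLoopA, Option.isNone_some, Option.isNone_none, Bool.false_eq_true,
      if_false, if_true]
    split_ifs with h1 h2
    · simp [pvLoopA_both, pvFinalA, Nat.not_lt.mpr (Nat.le_of_lt hf)]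
    · exact ih (i + 1) (Nat.lt_succ_of_lt hf)
    · exact ih (i + 1) (Nat.lt_succ_of_lt hf)

theorem pvLoopA_eq_alt (hs : List (List (String × String))) (i : Nat) :
    pvFinalA (pvLoopA hs i none none) = has_diagnostic_before_fix_py_alt hs := by
  induction hs generalizing i with
  | nil => rfl
  | cons h rest ih =>
    simp only [pvLoopA, has_diagnostic_before_fix_py_alt, Option.isNone_none, if_true]
    split_ifs with h1 h2
    · exact pvLoopA_diag rest (i + 1) i (Nat.lt_succ_self i)
    · exact pvLoopA_fix rest (i + 1) i (Nat.lt_succ_self i)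
    · exact ih (i + 1)

-- ===== VERDICT (by name: the statement is the Claim_ definition above) =====
theorem has_diagnostic_before_fix_py_spec : Claim_equal_has_diagnostic_before_fix_py := by
  intro history _
  show has_diagnostic_before_fix_py history = _
  exact pvLoopA_eq_alt history 0
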